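-- pv_equiv track=rewrite | github.com/jwyang21/coding-test | 프로그래머스/unrated/133502. 햄버거 만들기/햄버거 만들기.py | solution
-- ===== SOURCE A (Python) =====
-- def solution(ingredient):
--     tmp = []
--     answer = 0
--     for i in range(len(ingredient)):
--         tmp.append(ingredient[i])
--         if tmp[-4:] == [1, 2, 3, 1]:
--             answer += 1
--             for _ in range(4):
--                 tmp.pop()
--     return answer
-- ===== SOURCE B (Python) =====
-- def solution(ingredient):
--     lst = list(ingredient)
--     answer = 0
--     while True:
--         found = None
--         i = 0
--         while i + 4 <= len(lst):
--             if lst[i:i+4] == [1, 2, 3, 1]: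
--                 found = i
--                 break
--             i += 1
--         if found is None:
--             return answer
--         del lst[found:found+4]
--         answer += 1
-- ===== Notes on version B (the rewrite author's own statement) =====
-- stated objective: alternative
-- what changed: Replaces the single incremental stack pass with repeated leftmost-occurrence search on a shrinking list: scan for the first index i with lst[i:i+4] == [1,2,3,1], delete that slice, restart; return the count when no occurrence remains.
import Mathlib
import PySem

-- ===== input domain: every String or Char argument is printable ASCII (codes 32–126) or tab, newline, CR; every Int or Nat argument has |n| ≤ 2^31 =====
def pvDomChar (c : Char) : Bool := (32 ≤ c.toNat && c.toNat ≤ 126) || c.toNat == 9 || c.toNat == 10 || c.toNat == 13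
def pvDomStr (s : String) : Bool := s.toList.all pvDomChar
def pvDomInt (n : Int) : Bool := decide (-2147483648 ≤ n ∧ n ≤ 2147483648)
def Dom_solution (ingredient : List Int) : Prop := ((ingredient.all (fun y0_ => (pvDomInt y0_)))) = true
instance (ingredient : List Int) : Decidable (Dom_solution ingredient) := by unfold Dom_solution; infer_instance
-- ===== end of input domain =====

-- B replaces A's single incremental stack pass by repeated leftmost-occurrence search and
-- slice deletion on a shrinking list (an alternative algorithm, not claimed faster).

-- ===== PORT A =====
-- for i in range(len(ingredient)): tmp.append(ingredient[i]); if tmp[-4:] == [1,2,3,1]: answer += 1; pop ×4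
def solution (ingredient : List Int) : Int :=
  ((PySem.List.pyRange 0 (ingredient.length : Int) 1).foldl
    (fun (s : List Int × Int) i =>
      let tmp := s.1 ++ [PySem.List.pyGetD ingredient i 0]
      if PySem.List.slice tmp (some (-4)) none = [1, 2, 3, 1] then
        (tmp.dropLast.dropLast.dropLast.dropLast, s.2 + 1)
      else (tmp, s.2))
    (([] : List Int), (0 : Int))).2

-- ===== PORT B =====
-- inner while-loop of Source B: first index i with lst[i:i+4] == [1,2,3,1], else None
def findBurger : List Int → Option Nat
  | [] => none
  | x :: rest =>
      if (x :: rest).take 4 = [1, 2, 3, 1] then some 0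
      else (findBurger rest).map (· + 1)

-- termination fact for the outer loop (deletion shrinks the list)
theorem findBurger_bound : ∀ {xs : List Int} {i : Nat}, findBurger xs = some i → i + 4 ≤ xs.length := by
  intro xs
  induction xs with
  | nil => intro i h; simp [findBurger] at h
  | cons x rest ih =>
      intro i h
      simp only [findBurger] at h
      split at h
      · rename_i htake
        obtain rfl : i = 0 := by simpa using h.symm
        have hl : ((x :: rest).take 4).length = 4 := by rw [htake]; rfl
        simp [List.length_take, List.length_cons] at hl
        simp [List.length_cons]
        omega
      · rcases Option.map_eq_some_iff.mp h with ⟨j, hj, rfl⟩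
        have := ih hj
        simp [List.length_cons]
        omega

-- outer while-loop of Source B: del lst[i:i+4]; answer += 1; restart
def burgerLoop (lst : List Int) (answer : Int) : Int :=
  match h : findBurger lst with
  | none => answer
  | some i => burgerLoop (lst.take i ++ lst.drop (i + 4)) (answer + 1)
termination_by lst.length
decreasing_by
  have := findBurger_bound h
  simp [List.length_append, List.length_take, List.length_drop]
  omega

def solution_alt (ingredient : List Int) : Int := burgerLoop ingredient 0

-- ===== PRECONDITION & SPEC =====
def Spec_solution (ingredient : List Int) (out : Int) : Prop := out = solution_alt ingredient
instance (ingredient : List Int) (out : Int) : Decidable (Spec_solution ingredient out) := by unfold Spec_solution; infer_instance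

-- ===== CLAIM (what is proved, stated in full; the proofs are below) =====
def Claim_equal_solution : Prop := ∀ (ingredient : List Int), Dom_solution ingredient → Spec_solution ingredient (solution ingredient)

-- ===== LEMMAS AND PROOFS =====

-- clean form of A's stack loop: stack kept reversed (top first)
def runA : List Int → List Int → Int → Int
  | _, [], a => a
  | stk, x :: xs, a =>
      if (x :: stk).take 4 = [1, 3, 2, 1] then runA ((x :: stk).drop 4) xs (a + 1)
      else runA (x :: stk) xs a

-- an occurrence of the pattern at position j
def Occ (xs : List Int) (j : Nat) : Prop := (xs.drop j).take 4 = [1, 2, 3, 1]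

theorem occ_bound {xs : List Int} {j : Nat} (h : Occ xs j) : j + 4 ≤ xs.length := by
  have hl : ((xs.drop j).take 4).length = 4 := by rw [h]; rfl
  simp [List.length_take, List.length_drop] at hl
  omega

theorem occ_prefix {u : List Int} {j : Nat} (t : List Int) (h : Occ u j) : Occ (u ++ t) j := by
  have hb := occ_bound h
  unfold Occ at *
  rw [List.drop_append_of_le_length (by omega),
    List.take_append_of_le_length (by rw [List.length_drop]; omega)]
  exact h

theorem occ_of_rev_take {t : List Int} (h : t.reverse.take 4 = [1, 3, 2, 1]) : ∃ j, Occ t j := by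
  have hrev : t.reverse = [1, 3, 2, 1] ++ t.reverse.drop 4 := by
    conv_lhs => rw [← List.take_append_drop 4 t.reverse]
    rw [h]
  have ht : ∃ r : List Int, t = r ++ [1, 2, 3, 1] := by
    refine ⟨(t.reverse.drop 4).reverse, ?_⟩
    have := congrArg List.reverse hrev
    simpa using this
  obtain ⟨r, rfl⟩ := ht
  refine ⟨r.length, ?_⟩
  unfold Occ
  rw [List.drop_left]
  rfl

theorem findBurger_none {xs : List Int} (h : findBurger xs = none) : ∀ j, ¬ Occ xs j := by
  induction xs with
  | nil => intro j hj; have := occ_bound hj; simp at this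
  | cons x rest ih =>
      intro j hj
      simp only [findBurger] at h
      split at h
      · simp at h
      · rename_i htake
        cases j with
        | zero => exact htake (by simpa [Occ] using hj)
        | succ j' =>
            have hrest : findBurger rest = none := by
              cases hfr : findBurger rest with
              | none => rfl
              | some k => rw [hfr] at h; simp at h
            exact ih hrest j' (by simpa [Occ] using hj)

theorem findBurger_some : ∀ {xs : List Int} {i : Nat}, findBurger xs = some i →
    Occ xs i ∧ ∀ j < i, ¬ Occ xs j := by
  intro xs
  induction xs with
  | nil => intro i h; simp [findBurger] at h
  | cons x rest ih =>
      intro i h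
      simp only [findBurger] at h
      split at h
      · rename_i htake
        obtain rfl : i = 0 := by simpa using h.symm
        exact ⟨by simpa [Occ] using htake, by omega⟩
      · rename_i htake
        rcases Option.map_eq_some_iff.mp h with ⟨k, hk, rfl⟩
        obtain ⟨hocc, hmin⟩ := ih hk
        refine ⟨by simpa [Occ] using hocc, ?_⟩
        intro j hj hjo
        cases j with
        | zero => exact htake (by simpa [Occ] using hjo)
        | succ j' => exact hmin j' (by omega) (by simpa [Occ] using hjo)

theorem runA_prefix : ∀ (u w v : List Int) (a : Int), (∀ j, ¬ Occ (w ++ u) j) →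
    runA w.reverse (u ++ v) a = runA (w ++ u).reverse v a := by
  intro u
  induction u with
  | nil => intro w v a _; simp
  | cons c u' ih =>
      intro w v a h
      have hs : (c :: w.reverse) = (w ++ [c]).reverse := by simp
      have hcond : ¬ ((c :: w.reverse).take 4 = [1, 3, 2, 1]) := by
        intro hc
        rw [hs] at hc
        obtain ⟨j, hj⟩ := occ_of_rev_take hc
        exact h j (by
          have := occ_prefix u' hj
          simpa using this)
      show runA w.reverse (c :: (u' ++ v)) a = _
      rw [runA, if_neg hcond, hs]
      have h' : ∀ j, ¬ Occ ((w ++ [c]) ++ u') j := by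
        intro j; simpa using h j
      have := ih (w ++ [c]) v a h'
      rw [this]
      simp

theorem drop_reverse_pat {t : List Int} :
    t.reverse.take 4 = [1, 3, 2, 1] ↔ t.drop (t.length - 4) = [1, 2, 3, 1] := by
  rw [List.take_reverse]
  constructor
  · intro h
    have := congrArg List.reverse h
    simpa using this
  · intro h
    rw [h]
    rfl

theorem rev_dropLast (l : List Int) : l.dropLast.reverse = l.reverse.tail := by
  cases l with
  | nil => rfl
  | cons x xs =>
      rw [List.dropLast_eq_take, List.reverse_take]
      have h1 : (x :: xs).length - ((x :: xs).length - 1) = 1 := by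
        simp [List.length_cons]
      rw [h1, List.drop_one]

theorem reverse_dropLast4 (t : List Int) :
    (t.dropLast.dropLast.dropLast.dropLast).reverse = t.reverse.drop 4 := by
  rw [rev_dropLast, rev_dropLast, rev_dropLast, rev_dropLast]
  simp only [← List.drop_one, List.drop_drop]

-- A's port, fold over the list, agrees with runA on the reversed stack
theorem foldA_runA : ∀ (xs stk : List Int) (a : Int),
    (xs.foldl (fun (s : List Int × Int) x =>
      let tmp := s.1 ++ [x]
      if PySem.List.slice tmp (some (-4)) none = [1, 2, 3, 1] then
        (tmp.dropLast.dropLast.dropLast.dropLast, s.2 + 1)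
      else (tmp, s.2)) (stk, a)).2 = runA stk.reverse xs a := by
  intro xs
  induction xs with
  | nil => intro stk a; rfl
  | cons x xs ih =>
      intro stk a
      have hslice : PySem.List.slice (stk ++ [x]) (some (-4)) none
          = (stk ++ [x]).drop ((stk ++ [x]).length - 4) := by
        rw [PySem.List.slice_from_neg_ofNat _ 4 (by omega)]
      have hrev : (stk ++ [x]).reverse = x :: stk.reverse := by simp
      simp only [List.foldl_cons]
      rw [hslice]
      by_cases hc : (stk ++ [x]).drop ((stk ++ [x]).length - 4) = [1, 2, 3, 1]
      · have hc' : (x :: stk.reverse).take 4 = [1, 3, 2, 1] := by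
          rw [← hrev]; exact drop_reverse_pat.mpr hc
        rw [if_pos hc, ih, runA, if_pos hc', reverse_dropLast4, hrev]
      · have hc' : ¬ ((x :: stk.reverse).take 4 = [1, 3, 2, 1]) := by
          rw [← hrev]; exact fun h => hc (drop_reverse_pat.mp h)
        rw [if_neg hc, ih, runA, if_neg hc', ← hrev]

-- index loop over pyRange = fold over the list itself
theorem pyfold (xs : List Int) : ∀ (m k : Nat), k + m = xs.length → ∀ (init : List Int × Int),
    ((PySem.List.pyRange (k : Int) (xs.length : Int) 1).foldl
      (fun (s : List Int × Int) i =>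
        let tmp := s.1 ++ [PySem.List.pyGetD xs i 0]
        if PySem.List.slice tmp (some (-4)) none = [1, 2, 3, 1] then
          (tmp.dropLast.dropLast.dropLast.dropLast, s.2 + 1)
        else (tmp, s.2)) init)
    = ((xs.drop k).foldl
      (fun (s : List Int × Int) x =>
        let tmp := s.1 ++ [x]
        if PySem.List.slice tmp (some (-4)) none = [1, 2, 3, 1] then
          (tmp.dropLast.dropLast.dropLast.dropLast, s.2 + 1)
        else (tmp, s.2)) init) := by
  intro m
  induction m with
  | zero =>
      intro k hk init
      rw [PySem.List.pyRange_one_eq_nil (by exact_mod_cast Nat.le_of_eq (by omega)),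
        List.drop_eq_nil_of_le (by omega)]
      rfl
  | succ m ih =>
      intro k hk init
      have hklen : k < xs.length := by omega
      rw [PySem.List.pyRange_one_cons (by exact_mod_cast hklen)]
      rw [List.drop_eq_getElem_cons hklen]
      simp only [List.foldl_cons]
      have hget : PySem.List.pyGetD xs ((k : Nat) : Int) 0 = xs[k] := by
        rw [PySem.List.pyGetD_natCast, List.getD_eq_getElem _ _ hklen]
      rw [hget]
      have hcast : ((k : Int) + 1) = (((k + 1 : Nat)) : Int) := by push_cast; ring
      rw [hcast]
      exact ih (k + 1) (by omega) _

theorem solution_eq_runA (ingredient : List Int) : solution ingredient = runA [] ingredient 0 := by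
  unfold solution
  have h := pyfold ingredient ingredient.length 0 (by omega) ([], 0)
  rw [Nat.cast_zero, List.drop_zero] at h
  rw [h]
  simpa using foldA_runA ingredient [] 0

theorem burgerLoop_none {lst : List Int} {a : Int} (h : findBurger lst = none) :
    burgerLoop lst a = a := by
  rw [burgerLoop.eq_def]
  split <;> simp_all

theorem burgerLoop_some {lst : List Int} {i : Nat} {a : Int} (h : findBurger lst = some i) :
    burgerLoop lst a = burgerLoop (lst.take i ++ lst.drop (i + 4)) (a + 1) := by
  conv_lhs => rw [burgerLoop.eq_def]
  split <;> simp_all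

theorem runA_eq_burgerLoop : ∀ (n : Nat) (xs : List Int), xs.length ≤ n → ∀ (a : Int),
    runA [] xs a = burgerLoop xs a := by
  intro n
  induction n with
  | zero =>
      intro xs hl a
      obtain rfl : xs = [] := by
        cases xs with
        | nil => rfl
        | cons y ys => simp at hl
      rw [burgerLoop_none (show findBurger [] = none from rfl)]
      rfl
  | succ n ih =>
      intro xs hl a
      cases h : findBurger xs with
      | none =>
          rw [burgerLoop_none h]
          have := runA_prefix xs [] [] a (by simpa using findBurger_none h)
          simpa using this
      | some i =>
          obtain ⟨hocc, hmin⟩ := findBurger_some h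
          have hb : i + 4 ≤ xs.length := occ_bound hocc
          have hu : (xs.take i).length = i := by rw [List.length_take]; omega
          -- decomposition xs = take i ++ [1,2,3,1] ++ drop (i+4)
          have hdecomp : xs = xs.take i ++ ([1, 2, 3, 1] ++ xs.drop (i + 4)) := by
            conv_lhs => rw [← List.take_append_drop i xs]
            congr 1
            conv_lhs => rw [← List.take_append_drop 4 (xs.drop i)]
            rw [List.drop_drop]
            congr 1
          have hx2 : xs = (xs.take i ++ [1, 2, 3]) ++ (1 :: xs.drop (i + 4)) := by
            conv_lhs => rw [hdecomp]
            simp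
          -- no occurrence strictly inside take i ++ [1,2,3]
          have hpre : ∀ j, ¬ Occ (xs.take i ++ [1, 2, 3]) j := by
            intro j hj
            have hjb := occ_bound hj
            have hjlen : j + 4 ≤ i + 3 := by
              simpa [List.length_append, hu] using hjb
            have hxj : Occ xs j := by
              have h1 : Occ ((xs.take i ++ [1, 2, 3]) ++ (1 :: xs.drop (i + 4))) j :=
                occ_prefix _ hj
              rwa [← hx2] at h1
            exact hmin j (by omega) hxj
          -- no occurrence inside take i
          have hpreu : ∀ j, ¬ Occ (xs.take i) j := by
            intro j hj
            have hjb := occ_bound hj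
            have hxj : Occ xs j := by
              have h1 : Occ (xs.take i ++ ([1, 2, 3, 1] ++ xs.drop (i + 4))) j := occ_prefix _ hj
              rwa [← hdecomp] at h1
            exact hmin j (by rw [hu] at hjb; omega) hxj
          -- step 1: run through the clean prefix take i ++ [1,2,3]
          have step1 : runA [] xs a = runA (xs.take i ++ [1, 2, 3]).reverse (1 :: xs.drop (i + 4)) a := by
            conv_lhs => rw [hx2]
            have := runA_prefix (xs.take i ++ [1, 2, 3]) [] (1 :: xs.drop (i + 4)) a
              (by simpa using hpre)
            simpa using this
          -- step 2: the next element 1 completes the pattern and pops it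
          have hrev3 : (xs.take i ++ [1, 2, 3]).reverse = 3 :: 2 :: 1 :: (xs.take i).reverse := by
            simp
          have step2 : runA (xs.take i ++ [1, 2, 3]).reverse (1 :: xs.drop (i + 4)) a
              = runA (xs.take i).reverse (xs.drop (i + 4)) (a + 1) := by
            rw [hrev3]
            simp [runA]
          -- step 3: restart from the empty stack on take i ++ drop (i+4)
          have step3 : runA (xs.take i).reverse (xs.drop (i + 4)) (a + 1)
              = runA [] (xs.take i ++ xs.drop (i + 4)) (a + 1) := by
            have := runA_prefix (xs.take i) [] (xs.drop (i + 4)) (a + 1) (by simpa using hpreu)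
            simpa using this.symm
          have hlen : (xs.take i ++ xs.drop (i + 4)).length ≤ n := by
            rw [List.length_append, hu, List.length_drop]
            omega
          rw [step1, step2, step3, ih _ hlen, burgerLoop_some h]

-- ===== VERDICT (by name: the statement is the Claim_ definition above) =====
theorem solution_spec : Claim_equal_solution := by
  intro ingredient _
  show solution ingredient = solution_alt ingredient
  rw [solution_eq_runA, solution_alt,
    runA_eq_burgerLoop ingredient.length ingredient le_rfl]
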